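-- pv_equiv track=rewrite | github.com/stannbl/data-challenge_Kernel-methods | models/kernel_methods.py | extract_kmer_counts
-- ===== SOURCE A (Python) =====
-- from collections import Counter
-- from collections import Counter
-- from collections import Counter
--
-- def extract_kmer_counts(sequence, k, m, mismatch_dict):
--     """Extract k-mer counts allowing up to 'm' mismatches."""
--     kmer_dict = Counter()
--     sequence = str(sequence)  # Ensure input is a string
--
--     for i in range(len(sequence) - k + 1):
--         kmer = sequence[i:i + k]
--         if kmer in mismatch_dict:
--             for mismatch_kmer in mismatch_dict[kmer]:
--                 kmer_dict[mismatch_kmer] += 1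
--
--     return kmer_dict
-- ===== SOURCE B (Python) =====
-- from collections import Counter
--
-- def extract_kmer_counts(sequence, k, m, mismatch_dict):
--     """Extract k-mer counts allowing up to 'm' mismatches."""
--     sequence = str(sequence)
--     occurrences = Counter(sequence[i:i + k] for i in range(len(sequence) - k + 1))
--     stream = []
--     for kmer, c in occurrences.items():
--         if kmer in mismatch_dict:
--             stream += mismatch_dict[kmer] * c
--     return Counter(stream)
-- ===== Notes on version B (the rewrite author's own statement) =====
-- stated objective: alternative
-- what changed: A tallies into a dict while scanning positions; B instead stages three passes: Counter the k-mers, build one flat stream with each distinct k-mer's neighbor list repeated by its multiplicity, and Counter that stream once.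
import Mathlib
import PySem

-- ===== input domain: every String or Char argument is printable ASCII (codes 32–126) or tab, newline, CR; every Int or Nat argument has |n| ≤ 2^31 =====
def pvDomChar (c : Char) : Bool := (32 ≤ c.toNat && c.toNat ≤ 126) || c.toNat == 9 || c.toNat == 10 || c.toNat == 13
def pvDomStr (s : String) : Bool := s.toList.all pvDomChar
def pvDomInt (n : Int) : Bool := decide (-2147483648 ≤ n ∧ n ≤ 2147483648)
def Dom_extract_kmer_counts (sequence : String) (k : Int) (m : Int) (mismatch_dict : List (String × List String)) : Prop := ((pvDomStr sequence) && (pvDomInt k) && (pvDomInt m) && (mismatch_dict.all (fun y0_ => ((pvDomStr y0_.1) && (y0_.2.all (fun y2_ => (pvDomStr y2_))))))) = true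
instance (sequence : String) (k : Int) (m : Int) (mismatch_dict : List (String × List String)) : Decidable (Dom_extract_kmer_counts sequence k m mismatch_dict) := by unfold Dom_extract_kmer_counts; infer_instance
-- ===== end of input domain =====

-- B replaces A's per-position dict accumulation by three staged passes: a Counter of the
-- k-mers, then a flat stream of each distinct k-mer's neighbor list repeated by its
-- multiplicity, then one Counter of that stream (objective: alternative; same result).

-- ===== PORT A =====
def extract_kmer_counts (sequence : String) (k : Int) (m : Int) (mismatch_dict : List (String × List String)) : List (String × Int) :=
  let md : PySem.Dict String (List String) := PySem.Dict.mk mismatch_dict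
  let s : List Char := sequence.toList
  let d : PySem.Dict String Int :=
    (PySem.List.pyRange 0 ((s.length : Int) - k + 1) 1).foldl (fun d i =>
      let kmer : String := String.ofList (PySem.List.slice s (some i) (some (i + k)))
      if md.contains kmer then
        (md.getD kmer []).foldl (fun d n => d.modify n 0 (· + 1)) d
      else d) PySem.Dict.empty
  d.items

-- ===== PORT B =====
def extract_kmer_counts_alt (sequence : String) (k : Int) (m : Int) (mismatch_dict : List (String × List String)) : List (String × Int) :=
  let s : List Char := sequence.toList
  let occurrences : PySem.Dict String Int :=
    PySem.Dict.counter ((PySem.List.pyRange 0 ((s.length : Int) - k + 1) 1).map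
      (fun i => String.ofList (PySem.List.slice s (some i) (some (i + k)))))
  let md : PySem.Dict String (List String) := PySem.Dict.mk mismatch_dict
  let stream : List String :=
    occurrences.items.foldl (fun acc p =>
      if md.contains p.1 then acc ++ PySem.List.pyRepeat (md.getD p.1 []) p.2 else acc) []
  (PySem.Dict.counter stream).items

-- ===== PRECONDITION & SPEC =====
def Spec_extract_kmer_counts (sequence : String) (k : Int) (m : Int) (mismatch_dict : List (String × List String)) (out : List (String × Int)) : Prop := out = extract_kmer_counts_alt sequence k m mismatch_dict
instance (sequence : String) (k : Int) (m : Int) (mismatch_dict : List (String × List String)) (out : List (String × Int)) : Decidable (Spec_extract_kmer_counts sequence k m mismatch_dict out) := by unfold Spec_extract_kmer_counts; infer_instance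

-- ===== CLAIM (what is proved, stated in full; the proofs are below) =====
def Claim_equal_extract_kmer_counts : Prop := ∀ (sequence : String) (k : Int) (m : Int) (mismatch_dict : List (String × List String)), Dom_extract_kmer_counts sequence k m mismatch_dict → Spec_extract_kmer_counts sequence k m mismatch_dict (extract_kmer_counts sequence k m mismatch_dict)

-- ===== LEMMAS AND PROOFS =====

-- the neighbor list one occurrence of a k-mer contributes ([] when the guard fails)
def pvNb (md : PySem.Dict String (List String)) (K : String) : List String :=
  if md.contains K then md.getD K [] else []

-- the guarded per-k-mer step is the fold over pvNb
lemma pvStep_eq (md : PySem.Dict String (List String)) (K : String)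
    (d : PySem.Dict String Int) :
    (if md.contains K then (md.getD K []).foldl (fun d n => d.modify n 0 (· + 1)) d else d)
      = (pvNb md K).foldl (fun d n => d.modify n 0 (· + 1)) d := by
  unfold pvNb; split <;> simp

-- folding over a flatMap is the nested fold
lemma pvFoldl_flatMap {α β γ : Type} (g : α → List β) (f : γ → β → γ)
    (l : List α) (init : γ) :
    (l.flatMap g).foldl f init = l.foldl (fun acc x => (g x).foldl f acc) init := by
  induction l generalizing init with
  | nil => rfl
  | cons x t ih => simp [List.flatMap_cons, List.foldl_append, ih]

-- pyRepeat of the empty list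
lemma pvPyRepeat_nil {α : Type} (n : Int) : PySem.List.pyRepeat ([] : List α) n = [] := by
  unfold PySem.List.pyRepeat; simp

-- count inside a repeated list
lemma pvCount_pyRepeat {α : Type} [DecidableEq α] (xs : List α) (n : Int) (a : α) :
    (PySem.List.pyRepeat xs n).count a = n.toNat * xs.count a := by
  unfold PySem.List.pyRepeat
  induction n.toNat with
  | zero => simp
  | succ c ih => simp [List.replicate_succ, ih]; ring

-- count over a flatMap is the sum of the block counts
lemma pvCount_flatMap {α β : Type} [DecidableEq β] (f : α → List β) (l : List α) (a : β) :
    (l.flatMap f).count a = (l.map (fun x => (f x).count a)).sum := by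
  induction l with
  | nil => rfl
  | cons x t ih => simp [List.flatMap_cons, List.count_append, ih]

-- sum of a pointwise sum of maps (Nat)
lemma pvSum_map_add (l : List String) (f g : String → Nat) :
    (l.map (fun x => f x + g x)).sum = (l.map f).sum + (l.map g).sum := by
  induction l with
  | nil => rfl
  | cons x t ih => simp [ih]; ring

-- sum of a one-hot map over a Nodup list containing K picks out the K term (Nat)
lemma pvSum_single (l : List String) (K : String) (v : String → Nat)
    (hnd : l.Nodup) (hK : K ∈ l) :
    (l.map (fun x => (if x = K then (1 : Nat) else 0) * v x)).sum = v K := by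
  induction l with
  | nil => cases hK
  | cons a t ih =>
      rcases List.mem_cons.mp hK with h | h
      · have hKt : K ∉ t := fun hx => (List.nodup_cons.mp hnd).1 (by rw [← h]; exact hx)
        have hz : (t.map (fun x => (if x = K then (1 : Nat) else 0) * v x)).sum = 0 := by
          apply List.sum_eq_zero; intro y hy
          rcases List.mem_map.mp hy with ⟨x, hx, rfl⟩
          have hxa : x ≠ K := fun e => hKt (e ▸ hx)
          simp [hxa]
        rw [List.map_cons, List.sum_cons, hz, ← h, if_pos rfl]
        ring
      · have ha : a ≠ K := fun e => (List.nodup_cons.mp hnd).1 (by rw [e]; exact h)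
        rw [List.map_cons, List.sum_cons, if_neg ha, Nat.zero_mul, Nat.zero_add]
        exact ih (List.nodup_cons.mp hnd).2 h

-- a plain sum over L equals the multiplicity-weighted sum over its distinct elements (Nat)
lemma pvSum_dedup (L : List String) (g : String → Nat) :
    (L.map g).sum
      = ((PySem.Set.ofList L).map (fun K => L.count K * g K)).sum := by
  induction L using List.reverseRecOn with
  | nil => simp [PySem.Set.ofList]
  | append_singleton t K ih =>
      rw [List.map_append, List.sum_append, ih, PySem.Set.ofList_append_singleton]
      by_cases hK : K ∈ t
      · rw [PySem.Set.add_of_mem ((PySem.Set.mem_ofList t K).mpr hK)]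
        have hmap : ((PySem.Set.ofList t).map (fun K' => List.count K' (t ++ [K]) * g K'))
            = (PySem.Set.ofList t).map (fun K' => List.count K' t * g K'
                + (if K' = K then (1 : Nat) else 0) * g K') := by
          apply List.map_congr_left; intro x _
          rw [List.count_append]
          by_cases hxK : x = K
          · have h1 : List.count x [K] = 1 := by rw [hxK]; simp
            rw [h1, if_pos hxK]; ring
          · have h0 : List.count x [K] = 0 := by
              apply List.count_eq_zero.mpr; simp [hxK]
            rw [h0, if_neg hxK]; ring
        rw [hmap, pvSum_map_add,
          pvSum_single _ K g (PySem.Set.nodup_ofList t) ((PySem.Set.mem_ofList t K).mpr hK)]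
        simp
      · rw [PySem.Set.add_of_not_mem (fun h => hK ((PySem.Set.mem_ofList t K).mp h))]
        rw [List.map_append, List.sum_append]
        have hmap : ((PySem.Set.ofList t).map (fun K' => List.count K' (t ++ [K]) * g K'))
            = (PySem.Set.ofList t).map (fun K' => List.count K' t * g K') := by
          apply List.map_congr_left; intro x hx
          have hx' : x ∈ t := (PySem.Set.mem_ofList t x).mp hx
          have hne : x ≠ K := fun e => hK (e ▸ hx')
          have h0 : List.count x [K] = 0 := by
            apply List.count_eq_zero.mpr; simp [hne]
          rw [List.count_append, h0]; ring
        rw [hmap]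
        have h1 : List.count K (t ++ [K]) = 1 := by
          simp [List.count_append, List.count_eq_zero.mpr hK]
        simp [List.count_eq_zero.mpr hK]

-- two lists with the same distinct-element list and the same counts have the same Counter
lemma pvCounter_congr {α : Type} [DecidableEq α] [BEq α] [LawfulBEq α]
    (xs ys : List α)
    (hset : PySem.Set.ofList xs = PySem.Set.ofList ys)
    (hcnt : ∀ a, xs.count a = ys.count a) :
    PySem.Dict.counter xs = PySem.Dict.counter ys := by
  apply PySem.Dict.ext
  rw [PySem.Dict.items_counter, PySem.Dict.items_counter, hset]
  apply List.map_congr_left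
  intro a _
  simp [hcnt a]

-- membership is preserved by Set.update
lemma pvMem_update (s : PySem.Set String) (ys : List String) (y : String) (hy : y ∈ ys) :
    y ∈ PySem.Set.update s ys := by
  rw [PySem.Set.update_eq_append_filter]
  by_cases h : PySem.Set.contains s y = true
  · exact List.mem_append.mpr (Or.inl ((PySem.Set.contains_iff s y).mp h))
  · have hf : PySem.Set.contains s y = false := by simpa using h
    refine List.mem_append.mpr (Or.inr (List.mem_filter.mpr ⟨(PySem.Set.mem_ofList ys y).mpr hy, ?_⟩))
    simp
    intro hmem
    exact h ((PySem.Set.contains_iff s y).mpr hmem)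

-- updating with already-present elements is a no-op
lemma pvUpdate_of_subset (s : PySem.Set String) (zs : List String)
    (h : ∀ y ∈ zs, y ∈ s) : PySem.Set.update s zs = s := by
  rw [PySem.Set.update_eq_append_filter]
  have : (PySem.Set.ofList zs).filter (fun y => !s.contains y) = [] := by
    rw [List.filter_eq_nil_iff]
    intro y hy
    have hz : y ∈ zs := (PySem.Set.mem_ofList zs y).mp hy
    have hc : PySem.Set.contains s y = true := (PySem.Set.contains_iff s y).mpr (h y hz)
    simp
    exact h y hz
  rw [this, List.append_nil]

-- updating with a flattened repetition (at least one copy) is updating with the block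
lemma pvUpdate_flatten_replicate (ys : List String) :
    ∀ c : Nat, 1 ≤ c → ∀ s : PySem.Set String,
      PySem.Set.update s (List.replicate c ys).flatten = PySem.Set.update s ys := by
  intro c
  induction c with
  | zero => intro h; omega
  | succ c ih =>
      intro _ s
      rcases Nat.eq_zero_or_pos c with hc | hc
      · subst hc; simp
      · rw [List.replicate_succ, List.flatten_cons, PySem.Set.update_append, ih hc]
        exact pvUpdate_of_subset _ _ (fun y hy => pvMem_update s ys y hy)

-- updating with a repeated block (at least one copy) is updating with the block
lemma pvUpdate_pyRepeat (s : PySem.Set String) (ys : List String) (n : Int) (hn : 1 ≤ n.toNat) :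
    PySem.Set.update s (PySem.List.pyRepeat ys n) = PySem.Set.update s ys := by
  unfold PySem.List.pyRepeat
  exact pvUpdate_flatten_replicate ys n.toNat hn s

-- blockwise-equal updates give equal updates of the flattened streams
lemma pvUpdate_flatMap_congr (g h : String → List String) (ks : List String)
    (hgh : ∀ K ∈ ks, ∀ s : PySem.Set String, PySem.Set.update s (g K) = PySem.Set.update s (h K)) :
    ∀ s : PySem.Set String,
      PySem.Set.update s (ks.flatMap g) = PySem.Set.update s (ks.flatMap h) := by
  induction ks with
  | nil => intro s; rfl
  | cons K t ih =>
      intro s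
      rw [List.flatMap_cons, List.flatMap_cons, PySem.Set.update_append, PySem.Set.update_append,
        hgh K (List.mem_cons_self) s]
      exact ih (fun K' hK' s' => hgh K' (List.mem_cons_of_mem _ hK') s') _

-- deduplicating the flat neighbor stream commutes with deduplicating the k-mers first
lemma pvDedup_flatMap (f : String → List String) (L : List String) :
    PySem.Set.ofList (L.flatMap f)
      = PySem.Set.ofList ((PySem.Set.ofList L).flatMap f) := by
  induction L using List.reverseRecOn with
  | nil => rfl
  | append_singleton t K ih =>
      rw [List.flatMap_append, PySem.Set.ofList_append, PySem.Set.ofList_append_singleton]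
      by_cases hK : K ∈ t
      · rw [PySem.Set.add_of_mem ((PySem.Set.mem_ofList t K).mpr hK)]
        have hsub : PySem.Set.update (PySem.Set.ofList (t.flatMap f)) (([K] : List String).flatMap f)
            = PySem.Set.ofList (t.flatMap f) := by
          apply pvUpdate_of_subset
          intro y hy
          have hyf : y ∈ f K := by simpa using hy
          exact (PySem.Set.mem_ofList _ y).mpr (List.mem_flatMap.mpr ⟨K, hK, hyf⟩)
        rw [hsub, ih]
      · rw [PySem.Set.add_of_not_mem (fun h => hK ((PySem.Set.mem_ofList t K).mp h))]
        rw [List.flatMap_append, PySem.Set.ofList_append, ih]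

-- the core equality: A's per-occurrence tally is B's Counter of the repeated stream
lemma pvMain (md : PySem.Dict String (List String)) (L : List String) :
    PySem.Dict.counter (L.flatMap (pvNb md))
      = PySem.Dict.counter
          ((PySem.Set.ofList L).flatMap (fun K => PySem.List.pyRepeat (pvNb md K) ((L.count K : Nat) : Int))) := by
  apply pvCounter_congr
  · -- same distinct elements in the same order
    rw [pvDedup_flatMap (pvNb md) L]
    exact (pvUpdate_flatMap_congr
      (fun K => PySem.List.pyRepeat (pvNb md K) ((L.count K : Nat) : Int)) (pvNb md)
      (PySem.Set.ofList L)
      (fun K hK s => pvUpdate_pyRepeat s (pvNb md K) _ (by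
        have hKL : K ∈ L := (PySem.Set.mem_ofList L K).mp hK
        have h1 : 0 < L.count K := List.count_pos_iff.mpr hKL
        simpa using h1))
      PySem.Set.empty).symm
  · -- same multiplicities
    intro a
    rw [pvCount_flatMap, pvCount_flatMap, pvSum_dedup L (fun K => (pvNb md K).count a)]
    congr 1
    apply List.map_congr_left
    intro K _
    rw [pvCount_pyRepeat]
    simp

-- A's loop over positions is the Counter of the flat per-occurrence neighbor stream
lemma pvFoldA (md : PySem.Dict String (List String)) (f : Int → String) (r : List Int) :
    r.foldl (fun d i => (pvNb md (f i)).foldl (fun d n => d.modify n 0 (· + 1)) d) PySem.Dict.empty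
      = PySem.Dict.counter ((r.map f).flatMap (pvNb md)) := by
  rw [PySem.Dict.counter_eq_foldl, pvFoldl_flatMap, List.foldl_map]

-- B's stream loop is the repeated-block flatMap over the distinct k-mers
lemma pvStream (md : PySem.Dict String (List String)) (L : List String) :
    (PySem.Dict.counter L).items.foldl (fun acc p =>
        if md.contains p.1 then acc ++ PySem.List.pyRepeat (md.getD p.1 []) p.2 else acc) []
      = (PySem.Set.ofList L).flatMap (fun K => PySem.List.pyRepeat (pvNb md K) ((L.count K : Nat) : Int)) := by
  have hstep : ∀ (acc : List String) (p : String × Int),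
      (if md.contains p.1 then acc ++ PySem.List.pyRepeat (md.getD p.1 []) p.2 else acc)
        = acc ++ PySem.List.pyRepeat (pvNb md p.1) p.2 := by
    intro acc p
    unfold pvNb
    split <;> simp [pvPyRepeat_nil]
  simp only [hstep]
  rw [PySem.List.foldl_append_eq_flatMap, PySem.Dict.items_counter, List.flatMap_map,
    List.nil_append]

-- ===== VERDICT (by name: the statement is the Claim_ definition above) =====
theorem extract_kmer_counts_spec : Claim_equal_extract_kmer_counts := by
  intro sequence k m mismatch_dict _
  unfold Spec_extract_kmer_counts extract_kmer_counts extract_kmer_counts_alt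
  simp only [pvStep_eq, pvFoldA, pvStream, pvMain]
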